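-- pv_equiv track=rewrite | github.com/siva-dataworker/hacathoncarenavigator | backend/api/ai_service.py | check_faq
-- ===== SOURCE A (Python) =====
-- CLINIC_FAQ = {
--     "doctor_timing": "Our doctors are available Monday to Saturday, 9 AM to 8 PM. Sunday appointments are available on request.",
--     "trust": "We are a certified clinic with experienced doctors. All our doctors are licensed and have 10+ years of experience. We follow strict hygiene protocols.",
--     "emergency": "For emergencies, please call 108 immediately. We handle non-emergency consultations and routine care.",
--     "payment": "We accept cash, cards, UPI, and all major insurance plans. Consultation fees start from ₹300.",
--     "location": "We are located in the city center with easy parking. You can find our exact location on Google Maps.",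
--     "services": "We provide general consultation, diagnostics, minor procedures, and health checkups. Specialized treatments are referred to partner hospitals."
-- }
--
-- def check_faq(message, conversation_history=None):
--     """
--     Check if message is asking a FAQ question and return answer
--     Only return FAQ if it hasn't been answered recently
--
--     Args:
--         message: User message
--         conversation_history: List of previous messages (optional)
--
--     Returns:
--         FAQ answer or None
--     """
--     message_lower = message.lower()
--
--     # Check if this FAQ was already answered in last 3 messages
--     if conversation_history:
--         recent_messages = conversation_history[-3:] if len(conversation_history) > 3 else conversation_history
--         for msg in recent_messages:
--             if msg.get('role') == 'agent' or msg.get('role') == 'assistant':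
--                 # Check if any FAQ answer was already given
--                 for faq_answer in CLINIC_FAQ.values():
--                     if faq_answer in msg.get('content', ''):
--                         # FAQ already answered recently, don't repeat
--                         return None
--
--     # Doctor timing questions - be more specific
--     timing_keywords = ['when', 'what time', 'timing', 'hours', 'schedule', 'open', 'close']
--     doctor_keywords = ['doctor', 'physician', 'clinic']
--     if any(tk in message_lower for tk in timing_keywords) and any(dk in message_lower for dk in doctor_keywords):
--         return CLINIC_FAQ['doctor_timing']
--
--     # Trust/credibility questions
--     if any(word in message_lower for word in ['trust', 'certified', 'qualified', 'experience', 'licensed', 'why should']):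
--         return CLINIC_FAQ['trust']
--
--     # Emergency questions
--     if any(word in message_lower for word in ['emergency', 'urgent', 'critical', '108', '112']):
--         return CLINIC_FAQ['emergency']
--
--     # Payment questions
--     if any(word in message_lower for word in ['payment', 'cost', 'fee', 'price', 'insurance', 'accept', 'charge']):
--         return CLINIC_FAQ['payment']
--
--     # Location questions
--     if any(word in message_lower for word in ['location', 'address', 'where', 'parking', 'map', 'directions']):
--         return CLINIC_FAQ['location']
--
--     # Services questions
--     if any(word in message_lower for word in ['service', 'treatment', 'provide', 'offer', 'do you have', 'what do you']):
--         return CLINIC_FAQ['services']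
--
--     return None
-- ===== SOURCE B (Python) =====
-- # Inverted-index re-implementation: one flat scan over a keyword->tag index
-- # builds the set of matched tags; the answer is then picked purely by set
-- # membership of required tags (doctor_timing needs two tags), first rule wins.
--
-- _KEYWORD_TAGS = [
--     ('when', 'timing'), ('what time', 'timing'), ('timing', 'timing'),
--     ('hours', 'timing'), ('schedule', 'timing'), ('open', 'timing'),
--     ('close', 'timing'),
--     ('doctor', 'doctor'), ('physician', 'doctor'), ('clinic', 'doctor'),
--     ('trust', 'trust'), ('certified', 'trust'), ('qualified', 'trust'),
--     ('experience', 'trust'), ('licensed', 'trust'), ('why should', 'trust'),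
--     ('emergency', 'emergency'), ('urgent', 'emergency'),
--     ('critical', 'emergency'), ('108', 'emergency'), ('112', 'emergency'),
--     ('payment', 'payment'), ('cost', 'payment'), ('fee', 'payment'),
--     ('price', 'payment'), ('insurance', 'payment'), ('accept', 'payment'),
--     ('charge', 'payment'),
--     ('location', 'location'), ('address', 'location'), ('where', 'location'),
--     ('parking', 'location'), ('map', 'location'), ('directions', 'location'),
--     ('service', 'services'), ('treatment', 'services'),
--     ('provide', 'services'), ('offer', 'services'),
--     ('do you have', 'services'), ('what do you', 'services'),
-- ]
--
-- _RULES = [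
--     (('timing', 'doctor'),
--      "Our doctors are available Monday to Saturday, 9 AM to 8 PM. Sunday appointments are available on request."),
--     (('trust',),
--      "We are a certified clinic with experienced doctors. All our doctors are licensed and have 10+ years of experience. We follow strict hygiene protocols."),
--     (('emergency',),
--      "For emergencies, please call 108 immediately. We handle non-emergency consultations and routine care."),
--     (('payment',),
--      "We accept cash, cards, UPI, and all major insurance plans. Consultation fees start from \u20b9300."),
--     (('location',),
--      "We are located in the city center with easy parking. You can find our exact location on Google Maps."),
--     (('services',),
--      "We provide general consultation, diagnostics, minor procedures, and health checkups. Specialized treatments are referred to partner hospitals."),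
-- ]
--
-- _ANSWERS = [ans for _, ans in _RULES]
--
--
-- def check_faq(message, conversation_history=None):
--     message_lower = message.lower()
--
--     # history guard: don't repeat an FAQ answered in the last 3 messages
--     if conversation_history:
--         if any(ans in m.get('content', '')
--                for m in conversation_history[-3:]
--                if m.get('role') in ('agent', 'assistant')
--                for ans in _ANSWERS):
--             return None
--
--     # single flat pass: which tags have some keyword occurring in the message
--     tags = {tag for kw, tag in _KEYWORD_TAGS if kw in message_lower}
--
--     for needed, answer in _RULES:
--         if tags.issuperset(needed):
--             return answer
--     return None
-- ===== Notes on version B (the rewrite author's own statement) =====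
-- stated objective: alternative
-- what changed: Replaces the six per-branch any()-keyword scans with an inverted keyword->tag index: one flat pass over all keywords builds the set of matched tags, then the answer is chosen by pure set-membership rules (doctor_timing requires two tags), first rule winning; the history guard is a single flat any() over the recent agent/assistant contents and the rules' answers.
import Mathlib
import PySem

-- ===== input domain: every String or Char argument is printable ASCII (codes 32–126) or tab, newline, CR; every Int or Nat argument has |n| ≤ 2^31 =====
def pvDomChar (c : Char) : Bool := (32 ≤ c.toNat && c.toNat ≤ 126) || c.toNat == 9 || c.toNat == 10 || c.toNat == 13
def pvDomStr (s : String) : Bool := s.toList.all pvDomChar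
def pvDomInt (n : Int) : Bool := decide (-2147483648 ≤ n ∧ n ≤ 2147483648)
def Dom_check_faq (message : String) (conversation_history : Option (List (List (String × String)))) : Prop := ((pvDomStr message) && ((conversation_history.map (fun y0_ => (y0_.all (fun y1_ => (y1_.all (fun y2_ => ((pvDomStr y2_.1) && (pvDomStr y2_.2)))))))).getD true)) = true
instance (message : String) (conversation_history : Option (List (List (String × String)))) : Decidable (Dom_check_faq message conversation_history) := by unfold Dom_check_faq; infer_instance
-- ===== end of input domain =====

-- One honest line: B replaces A's six per-branch keyword scans by one flat pass over an
-- inverted keyword→tag index building a tag set, then picks the answer by set-membership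
-- rules (objective: alternative).

-- ===== PORT A =====
-- CLINIC_FAQ as a PySem.Dict literal (Python dict, insertion order)
def clinicFAQ : PySem.Dict String String := PySem.Dict.ofList [
  ("doctor_timing", "Our doctors are available Monday to Saturday, 9 AM to 8 PM. Sunday appointments are available on request."),
  ("trust", "We are a certified clinic with experienced doctors. All our doctors are licensed and have 10+ years of experience. We follow strict hygiene protocols."),
  ("emergency", "For emergencies, please call 108 immediately. We handle non-emergency consultations and routine care."),
  ("payment", "We accept cash, cards, UPI, and all major insurance plans. Consultation fees start from ₹300."),
  ("location", "We are located in the city center with easy parking. You can find our exact location on Google Maps."),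
  ("services", "We provide general consultation, diagnostics, minor procedures, and health checkups. Specialized treatments are referred to partner hospitals.")]

-- the history-guard loop of A: True iff some recent agent/assistant message contains an FAQ answer
def pvAGuard (h : List (List (String × String))) : Bool :=
  let recent := if h.length > 3 then PySem.List.slice h (some (-3)) none else h
  recent.any (fun msg =>
    let d := PySem.Dict.ofList msg
    (PySem.Dict.get? d "role" == some "agent" || PySem.Dict.get? d "role" == some "assistant") &&
    (PySem.Dict.values clinicFAQ).any (fun fa => PySem.Str.isIn fa (PySem.Dict.getD d "content" "")))

-- CLINIC_FAQ['k'] ported as getD with "" default: exact here since all six keys are present in the literal dict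
def check_faq (message : String) (conversation_history : Option (List (List (String × String)))) : Option String :=
  let message_lower := PySem.Str.lower message
  let blocked : Bool := match conversation_history with
    | none => false
    | some h => if h.isEmpty then false else pvAGuard h
  if blocked then none
  else if ((["when", "what time", "timing", "hours", "schedule", "open", "close"] : List String).any
              (fun tk => PySem.Str.isIn tk message_lower)) &&
          ((["doctor", "physician", "clinic"] : List String).any
              (fun dk => PySem.Str.isIn dk message_lower)) then
    some (PySem.Dict.getD clinicFAQ "doctor_timing" "")
  else if (["trust", "certified", "qualified", "experience", "licensed", "why should"] : List String).any
              (fun w => PySem.Str.isIn w message_lower) then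
    some (PySem.Dict.getD clinicFAQ "trust" "")
  else if (["emergency", "urgent", "critical", "108", "112"] : List String).any
              (fun w => PySem.Str.isIn w message_lower) then
    some (PySem.Dict.getD clinicFAQ "emergency" "")
  else if (["payment", "cost", "fee", "price", "insurance", "accept", "charge"] : List String).any
              (fun w => PySem.Str.isIn w message_lower) then
    some (PySem.Dict.getD clinicFAQ "payment" "")
  else if (["location", "address", "where", "parking", "map", "directions"] : List String).any
              (fun w => PySem.Str.isIn w message_lower) then
    some (PySem.Dict.getD clinicFAQ "location" "")
  else if (["service", "treatment", "provide", "offer", "do you have", "what do you"] : List String).any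
              (fun w => PySem.Str.isIn w message_lower) then
    some (PySem.Dict.getD clinicFAQ "services" "")
  else none

-- ===== PORT B =====
-- _KEYWORD_TAGS: the inverted keyword → tag index, one flat list
def pvKwTags : List (String × String) := [
  ("when", "timing"), ("what time", "timing"), ("timing", "timing"),
  ("hours", "timing"), ("schedule", "timing"), ("open", "timing"),
  ("close", "timing"),
  ("doctor", "doctor"), ("physician", "doctor"), ("clinic", "doctor"),
  ("trust", "trust"), ("certified", "trust"), ("qualified", "trust"),
  ("experience", "trust"), ("licensed", "trust"), ("why should", "trust"),
  ("emergency", "emergency"), ("urgent", "emergency"),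
  ("critical", "emergency"), ("108", "emergency"), ("112", "emergency"),
  ("payment", "payment"), ("cost", "payment"), ("fee", "payment"),
  ("price", "payment"), ("insurance", "payment"), ("accept", "payment"),
  ("charge", "payment"),
  ("location", "location"), ("address", "location"), ("where", "location"),
  ("parking", "location"), ("map", "location"), ("directions", "location"),
  ("service", "services"), ("treatment", "services"),
  ("provide", "services"), ("offer", "services"),
  ("do you have", "services"), ("what do you", "services")]

-- _RULES: required tags → answer, in order
def pvRules : List (List String × String) := [
  (["timing", "doctor"],
   "Our doctors are available Monday to Saturday, 9 AM to 8 PM. Sunday appointments are available on request."),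
  (["trust"],
   "We are a certified clinic with experienced doctors. All our doctors are licensed and have 10+ years of experience. We follow strict hygiene protocols."),
  (["emergency"],
   "For emergencies, please call 108 immediately. We handle non-emergency consultations and routine care."),
  (["payment"],
   "We accept cash, cards, UPI, and all major insurance plans. Consultation fees start from ₹300."),
  (["location"],
   "We are located in the city center with easy parking. You can find our exact location on Google Maps."),
  (["services"],
   "We provide general consultation, diagnostics, minor procedures, and health checkups. Specialized treatments are referred to partner hospitals.")]

-- _ANSWERS = [ans for _, ans in _RULES]
def pvAnswers : List String := pvRules.map Prod.snd

-- B's history guard: the flat any() over recent agent/assistant contents and the answers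
def pvBGuard (h : List (List (String × String))) : Bool :=
  (PySem.List.slice h (some (-3)) none).any (fun m =>
    let d := PySem.Dict.ofList m
    decide (PySem.Dict.get? d "role" ∈ ([some "agent", some "assistant"] : List (Option String))) &&
    pvAnswers.any (fun ans => PySem.Str.isIn ans (PySem.Dict.getD d "content" "")))

-- the tag-set comprehension: {tag for kw, tag in _KEYWORD_TAGS if kw in message_lower}
def pvTagsOf (ml : String) : PySem.Set String :=
  PySem.Set.ofList ((pvKwTags.filter (fun p => PySem.Str.isIn p.1 ml)).map Prod.snd)

-- the 'for needed, answer in _RULES: if tags.issuperset(needed): return answer' loop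
def pvPick (tags : PySem.Set String) : List (List String × String) → Option String
  | [] => none
  | (needed, ans) :: rest =>
      if PySem.Set.issuperset tags needed then some ans else pvPick tags rest

def check_faq_alt (message : String) (conversation_history : Option (List (List (String × String)))) : Option String :=
  let message_lower := PySem.Str.lower message
  let blocked : Bool := match conversation_history with
    | none => false
    | some h => if h.isEmpty then false else pvBGuard h
  if blocked then none
  else pvPick (pvTagsOf message_lower) pvRules

-- ===== PRECONDITION & SPEC =====
def Spec_check_faq (message : String) (conversation_history : Option (List (List (String × String)))) (out : Option String) : Prop := out = check_faq_alt message conversation_history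
instance (message : String) (conversation_history : Option (List (List (String × String)))) (out : Option String) : Decidable (Spec_check_faq message conversation_history out) := by unfold Spec_check_faq; infer_instance

-- ===== CLAIM =====
def Claim_equal_check_faq : Prop := ∀ (message : String) (conversation_history : Option (List (List (String × String)))), Dom_check_faq message conversation_history → Spec_check_faq message conversation_history (check_faq message conversation_history)

-- ===== LEMMAS AND PROOFS =====

-- values of the literal CLINIC_FAQ dict = the answers of B's rules table
theorem pvValues_eq : PySem.Dict.values clinicFAQ = pvAnswers := by rfl

-- the two history guards compute the same Boolean
theorem pvGuard_eq (h : List (List (String × String))) : pvAGuard h = pvBGuard h := by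
  unfold pvAGuard pvBGuard
  have hrec : (if h.length > 3 then PySem.List.slice h (some (-3)) none else h)
      = PySem.List.slice h (some (-3)) none := by
    by_cases hl : h.length > 3
    · rw [if_pos hl]
    · rw [if_neg hl, PySem.List.slice_from_neg_ofNat h 3 (by omega)]
      have h0 : h.length - 3 = 0 := by omega
      rw [h0, List.drop_zero]
  rw [hrec, pvValues_eq]
  dsimp only
  exact congrArg _ (funext fun msg => by simp [List.mem_cons, Bool.beq_eq_decide_eq])

-- membership in the comprehension-built tag set, as an any() over the flat index
theorem pvContains_tags (ml t : String) :
    PySem.Set.contains (pvTagsOf ml) t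
      = pvKwTags.any (fun p => PySem.Str.isIn p.1 ml && p.2 == t) := by
  rw [Bool.eq_iff_iff]
  unfold pvTagsOf
  simp only [PySem.Set.contains_eq_listContains, List.contains_iff_mem, List.mem_map,
    List.mem_filter, List.any_eq_true, Bool.and_eq_true, beq_iff_eq,
    PySem.Set.mem_ofList]
  constructor
  · rintro ⟨p, ⟨hp, hf⟩, ht⟩; exact ⟨p, hp, hf, ht⟩
  · rintro ⟨p, hp, hf, ht⟩; exact ⟨p, ⟨hp, hf⟩, ht⟩

-- each tag is in the set iff its keyword group fired
theorem pvTag_timing (ml : String) : PySem.Set.contains (pvTagsOf ml) "timing"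
    = (["when", "what time", "timing", "hours", "schedule", "open", "close"] : List String).any (fun tk => PySem.Str.isIn tk ml) := by
  rw [pvContains_tags]; simp [pvKwTags]
theorem pvTag_doctor (ml : String) : PySem.Set.contains (pvTagsOf ml) "doctor"
    = (["doctor", "physician", "clinic"] : List String).any (fun dk => PySem.Str.isIn dk ml) := by
  rw [pvContains_tags]; simp [pvKwTags]
theorem pvTag_trust (ml : String) : PySem.Set.contains (pvTagsOf ml) "trust"
    = (["trust", "certified", "qualified", "experience", "licensed", "why should"] : List String).any (fun w => PySem.Str.isIn w ml) := by
  rw [pvContains_tags]; simp [pvKwTags]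
theorem pvTag_emergency (ml : String) : PySem.Set.contains (pvTagsOf ml) "emergency"
    = (["emergency", "urgent", "critical", "108", "112"] : List String).any (fun w => PySem.Str.isIn w ml) := by
  rw [pvContains_tags]; simp [pvKwTags]
theorem pvTag_payment (ml : String) : PySem.Set.contains (pvTagsOf ml) "payment"
    = (["payment", "cost", "fee", "price", "insurance", "accept", "charge"] : List String).any (fun w => PySem.Str.isIn w ml) := by
  rw [pvContains_tags]; simp [pvKwTags]
theorem pvTag_location (ml : String) : PySem.Set.contains (pvTagsOf ml) "location"
    = (["location", "address", "where", "parking", "map", "directions"] : List String).any (fun w => PySem.Str.isIn w ml) := by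
  rw [pvContains_tags]; simp [pvKwTags]
theorem pvTag_services (ml : String) : PySem.Set.contains (pvTagsOf ml) "services"
    = (["service", "treatment", "provide", "offer", "do you have", "what do you"] : List String).any (fun w => PySem.Str.isIn w ml) := by
  rw [pvContains_tags]; simp [pvKwTags]

-- issuperset over one- and two-element requirement lists
theorem pvSup1 (s : PySem.Set String) (a : String) :
    PySem.Set.issuperset s [a] = PySem.Set.contains s a := by
  rw [Bool.eq_iff_iff, PySem.Set.issuperset_iff, PySem.Set.contains_iff]
  constructor
  · intro h; exact h a (by simp)
  · intro h x hx
    rcases List.mem_cons.mp hx with rfl | hx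
    · exact h
    · cases hx
theorem pvSup2 (s : PySem.Set String) (a b : String) :
    PySem.Set.issuperset s [a, b] = (PySem.Set.contains s a && PySem.Set.contains s b) := by
  rw [Bool.eq_iff_iff, PySem.Set.issuperset_iff, Bool.and_eq_true,
    PySem.Set.contains_iff, PySem.Set.contains_iff]
  constructor
  · intro h; exact ⟨h a (by simp), h b (by simp)⟩
  · rintro ⟨ha, hb⟩ x hx
    rcases List.mem_cons.mp hx with rfl | hx
    · exact ha
    · rcases List.mem_cons.mp hx with rfl | hx
      · exact hb
      · cases hx

-- CLINIC_FAQ['k'] lookups on the literal dict, computed once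
theorem pvGetD_timing : PySem.Dict.getD clinicFAQ "doctor_timing" "" = "Our doctors are available Monday to Saturday, 9 AM to 8 PM. Sunday appointments are available on request." := by rfl
theorem pvGetD_trust : PySem.Dict.getD clinicFAQ "trust" "" = "We are a certified clinic with experienced doctors. All our doctors are licensed and have 10+ years of experience. We follow strict hygiene protocols." := by rfl
theorem pvGetD_emergency : PySem.Dict.getD clinicFAQ "emergency" "" = "For emergencies, please call 108 immediately. We handle non-emergency consultations and routine care." := by rfl
theorem pvGetD_payment : PySem.Dict.getD clinicFAQ "payment" "" = "We accept cash, cards, UPI, and all major insurance plans. Consultation fees start from \u20b9300." := by rfl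
theorem pvGetD_location : PySem.Dict.getD clinicFAQ "location" "" = "We are located in the city center with easy parking. You can find our exact location on Google Maps." := by rfl
theorem pvGetD_services : PySem.Dict.getD clinicFAQ "services" "" = "We provide general consultation, diagnostics, minor procedures, and health checkups. Specialized treatments are referred to partner hospitals." := by rfl

-- B's rule loop over the literal table equals A's six-branch if-chain
theorem pvChain_eq (ml : String) :
    pvPick (pvTagsOf ml) pvRules =
      (if ((["when", "what time", "timing", "hours", "schedule", "open", "close"] : List String).any
              (fun tk => PySem.Str.isIn tk ml)) &&
          ((["doctor", "physician", "clinic"] : List String).any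
              (fun dk => PySem.Str.isIn dk ml)) then
        some (PySem.Dict.getD clinicFAQ "doctor_timing" "")
      else if (["trust", "certified", "qualified", "experience", "licensed", "why should"] : List String).any
              (fun w => PySem.Str.isIn w ml) then
        some (PySem.Dict.getD clinicFAQ "trust" "")
      else if (["emergency", "urgent", "critical", "108", "112"] : List String).any
              (fun w => PySem.Str.isIn w ml) then
        some (PySem.Dict.getD clinicFAQ "emergency" "")
      else if (["payment", "cost", "fee", "price", "insurance", "accept", "charge"] : List String).any
              (fun w => PySem.Str.isIn w ml) then
        some (PySem.Dict.getD clinicFAQ "payment" "")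
      else if (["location", "address", "where", "parking", "map", "directions"] : List String).any
              (fun w => PySem.Str.isIn w ml) then
        some (PySem.Dict.getD clinicFAQ "location" "")
      else if (["service", "treatment", "provide", "offer", "do you have", "what do you"] : List String).any
              (fun w => PySem.Str.isIn w ml) then
        some (PySem.Dict.getD clinicFAQ "services" "")
      else none) := by
  simp only [pvRules, pvPick, pvSup1, pvSup2, pvTag_timing, pvTag_doctor, pvTag_trust,
    pvTag_emergency, pvTag_payment, pvTag_location, pvTag_services,
    pvGetD_timing, pvGetD_trust, pvGetD_emergency, pvGetD_payment, pvGetD_location,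
    pvGetD_services]

-- ===== VERDICT =====
theorem check_faq_spec : Claim_equal_check_faq := by
  intro message conversation_history _
  unfold Spec_check_faq check_faq check_faq_alt
  simp only [pvGuard_eq, pvChain_eq]
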